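-- pv_equiv track=rewrite | github.com/pypi-data/pypi-mirror-369 | packages/momotor-engine-options/momotor_engine_options-2.1.1-py3-none-any.whl/momotor/options/tools/tool.py | _unquote
-- ===== SOURCE A (Python) =====
-- def _unquote(value: str) -> str:
--     """
--
--     >>> _unquote('')
--     ''
--
--     >>> _unquote('no quotes')
--     'no quotes'
--
--     >>> _unquote('  unquoted space is stripped  ')
--     'unquoted space is stripped'
--
--     >>> _unquote('"quoted"')
--     'quoted'
--
--     >>> _unquote("'quoted'")
--     'quoted'
--
--     >>> _unquote('"  quoted keeps all space  "')
--     '  quoted keeps all space  '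
--
--     >>> _unquote('  "leading and trailing space is ignored"  ')
--     'leading and trailing space is ignored'
--
--     >>> _unquote('"quoted" with trailing')
--     'quoted'
--
--     >>> _unquote(r'"quoted \\"with escape\\""')
--     'quoted "with escape"'
--
--     >>> _unquote('"unbalanced')
--     '"unbalanced'
--
--     :param value:
--     :return:
--     """
--     # If value starts with a quote, find the matching end-quote and ignore everything after that,
--     # ignoring backslash-escaped quotes
--     idx, vl = 0, len(value)
--     while idx < vl and value[idx] in ' \t':
--         idx += 1
--
--     if idx < vl:
--         q = value[idx]
--         if q in '"\'':
--             c, lc, qv = '', '', ''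
--             idx += 1
--             while idx < vl:
--                 qv += c
--                 lc, c = c, value[idx]
--                 if c == q:
--                     if lc != '\\':
--                         return qv
--
--                     qv = qv[:-1]
--
--                 idx += 1
--
--     return value.strip()
-- ===== SOURCE B (Python) =====
-- def _unquote(value: str) -> str:
--     stripped = value.lstrip(' \t')
--     if stripped[:1] in ('"', "'"):
--         q = stripped[0]
--         for p in range(1, len(stripped)):
--             if stripped[p] == q and stripped[p - 1] != '\\':
--                 content = stripped[1:p]
--                 out = []
--                 i = 0
--                 while i < len(content):
--                     if content[i] == '\\' and i + 1 < len(content) and content[i + 1] == q: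
--                         i += 1
--                     out.append(content[i])
--                     i += 1
--                 return ''.join(out)
--     return value.strip()
-- ===== Notes on version B (the rewrite author's own statement) =====
-- stated objective: simpler
-- what changed: A's single fused scan with a lagging-character state (c, lc, qv rebuilt with dropLast on escapes) is split into two plain passes: first find the closing quote (first q not preceded by a backslash), then unescape the extracted content by dropping each backslash immediately followed by q.
import Mathlib
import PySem

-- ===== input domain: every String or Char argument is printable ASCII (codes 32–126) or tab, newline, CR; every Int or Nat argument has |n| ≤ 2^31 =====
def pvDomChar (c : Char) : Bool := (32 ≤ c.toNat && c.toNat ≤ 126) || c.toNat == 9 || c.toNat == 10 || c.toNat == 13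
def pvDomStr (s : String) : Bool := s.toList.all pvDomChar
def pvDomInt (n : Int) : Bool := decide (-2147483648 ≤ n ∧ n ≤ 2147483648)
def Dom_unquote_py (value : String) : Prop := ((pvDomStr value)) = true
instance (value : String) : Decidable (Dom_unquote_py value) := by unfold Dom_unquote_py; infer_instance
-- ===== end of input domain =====

-- B replaces A's fused lagging-state scan by two plain passes (find the closing quote, then
-- unescape the extracted content); same return value, no speed claim.

-- ===== PORT A =====
-- A's leading 'while idx < vl and value[idx] in " \t"' skip loop.
def unquoteASkip : List Char → List Char
  | [] => []
  | x :: rest => if x = ' ' ∨ x = '\t' then unquoteASkip rest else x :: rest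

-- A's main while loop; c/lc model Python's one-char-or-empty strings '' / value[idx];
-- 'none' means the loop fell through (no unescaped closing quote), so A returns value.strip().
def unquoteALoop (q : Char) (c lc qv : List Char) : List Char → Option (List Char)
  | [] => none
  | x :: rest =>
    let qv' := qv ++ c       -- qv += c
    let lc' := c             -- lc, c = c, value[idx]
    let c' := [x]
    if c' = [q] then
      if lc' ≠ ['\\'] then some qv'
      else unquoteALoop q c' lc' qv'.dropLast rest   -- qv = qv[:-1]
    else unquoteALoop q c' lc' qv' rest

def unquote_py (value : String) : String :=
  let rest := unquoteASkip value.toList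
  match rest with
  | [] => PySem.Str.strip value
  | q :: tail =>
    if q = '"' ∨ q = '\'' then
      match unquoteALoop q [] [] [] tail with
      | some qv => String.ofList qv
      | none => PySem.Str.strip value
    else PySem.Str.strip value

-- ===== PORT B =====
-- B's 'for p in range(1, len(stripped))' search for the closing quote: prev carries
-- stripped[p-1] (initially the opening quote itself); returns the content before it.
def unquoteBFind (q prev : Char) : List Char → Option (List Char)
  | [] => none
  | x :: rest =>
    if x = q ∧ prev ≠ '\\' then some []
    else (unquoteBFind q x rest).map (x :: ·)

-- B's unescape loop: drop each backslash immediately followed by q.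
def unquoteBUnesc (q : Char) : List Char → List Char
  | [] => []
  | x :: rest =>
    if x = '\\' then
      match rest with
      | y :: rest' => if y = q then y :: unquoteBUnesc q rest' else x :: unquoteBUnesc q (y :: rest')
      | [] => [x]
    else x :: unquoteBUnesc q rest

def unquote_py_alt (value : String) : String :=
  let stripped := value.toList.dropWhile (fun ch => ch = ' ' ∨ ch = '\t')  -- value.lstrip(' \t')
  match stripped with
  | q :: tail =>
    if q = '"' ∨ q = '\'' then
      match unquoteBFind q q tail with
      | some content => String.ofList (unquoteBUnesc q content)
      | none => PySem.Str.strip value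
    else PySem.Str.strip value
  | [] => PySem.Str.strip value

-- ===== PRECONDITION & SPEC =====
def Spec_unquote_py (value : String) (out : String) : Prop := out = unquote_py_alt value
instance (value : String) (out : String) : Decidable (Spec_unquote_py value out) := by unfold Spec_unquote_py; infer_instance

-- ===== CLAIM (what is proved, stated in full; the proofs are below) =====
def Claim_equal_unquote_py : Prop := ∀ (value : String), Dom_unquote_py value → Spec_unquote_py value (unquote_py value)

-- ===== LEMMAS AND PROOFS =====

theorem unquoteASkip_eq_dropWhile (l : List Char) :
    unquoteASkip l = l.dropWhile (fun ch => ch = ' ' ∨ ch = '\t') := by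
  induction l with
  | nil => rfl
  | cons x rest ih =>
    by_cases h : x = ' ' ∨ x = '\t' <;>
      simp [unquoteASkip, List.dropWhile, h, ih]

-- lagged unescape: output of processing 'content' when 'prev' is the pending (already
-- consumed, not yet emitted) character
def unquoteCUnesc (q prev : Char) : List Char → List Char
  | [] => [prev]
  | x :: rest =>
    if prev = '\\' ∧ x = q then unquoteCUnesc q x rest
    else prev :: unquoteCUnesc q x rest

theorem unesc_lag (q : Char) (hq : q ≠ '\\') (prev : Char) (content : List Char) :
    unquoteBUnesc q (prev :: content) = unquoteCUnesc q prev content := by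
  induction content generalizing prev with
  | nil =>
    by_cases h : prev = '\\' <;> simp [unquoteBUnesc, unquoteCUnesc, h]
  | cons x rest ih =>
    by_cases hp : prev = '\\'
    · by_cases hx : x = q
      · subst hx hp
        rw [show unquoteCUnesc x '\\' (x :: rest) = unquoteCUnesc x x rest by
              simp [unquoteCUnesc],
            ← ih x]
        conv_rhs => rw [unquoteBUnesc.eq_def]
        conv_lhs => rw [unquoteBUnesc.eq_def]
        simp [hq]
      · simp [unquoteBUnesc, unquoteCUnesc, hp, hx, ih]
    · simp [unquoteBUnesc, unquoteCUnesc, hp, ih]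

theorem aLoop_eq_find (q : Char) (rest : List Char) :
    ∀ (prev : Char) (lc acc : List Char),
    unquoteALoop q [prev] lc acc rest
      = (unquoteBFind q prev rest).map (fun content => acc ++ unquoteCUnesc q prev content) := by
  induction rest with
  | nil => intro prev lc acc; rfl
  | cons x rest ih =>
    intro prev lc acc
    by_cases hx : x = q
    · by_cases hp : prev = '\\'
      · subst hx hp
        -- escaped quote: A drops the pending backslash, B's find keeps scanning
        simp only [unquoteALoop, unquoteBFind, if_true]
        rw [if_neg (by simp : ¬(['\\'] : List Char) ≠ ['\\'])]
        rw [if_neg (by simp : ¬(True ∧ ('\\' : Char) ≠ '\\'))]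
        rw [show (acc ++ ['\\']).dropLast = acc by simp]
        rw [ih _ ['\\'] acc, Option.map_map]
        apply congrArg (fun f => Option.map f (unquoteBFind x x rest))
        funext content
        simp [unquoteCUnesc]
      · subst hx
        -- real closing quote: both stop here
        simp [unquoteALoop, unquoteBFind, hp, unquoteCUnesc]
    · -- ordinary character: both consume it
      simp only [unquoteALoop, unquoteBFind]
      rw [if_neg (by simp [hx] : ¬([x] = [q]))]
      rw [if_neg (by simp [hx] : ¬(x = q ∧ prev ≠ '\\'))]
      rw [ih x [prev] (acc ++ [prev]), Option.map_map]
      apply congrArg (fun f => Option.map f (unquoteBFind q x rest))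
      funext content
      simp [unquoteCUnesc, hx]

theorem aLoop_init (q : Char) (hq : q ≠ '\\') (tail : List Char) :
    unquoteALoop q [] [] [] tail
      = (unquoteBFind q q tail).map (fun content => unquoteBUnesc q content) := by
  cases tail with
  | nil => rfl
  | cons x rest =>
    by_cases hx : x = q
    · subst hx
      simp [unquoteALoop, unquoteBFind, hq, unquoteBUnesc]
    · simp only [unquoteALoop, unquoteBFind]
      rw [if_neg (by simp [hx] : ¬([x] = [q]))]
      rw [if_neg (by simp [hx] : ¬(x = q ∧ q ≠ '\\'))]
      rw [List.append_nil, aLoop_eq_find q rest x [] []]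
      rw [Option.map_map]
      apply congrArg (fun f => Option.map f (unquoteBFind q x rest))
      funext content
      simp [unesc_lag q hq x content]

-- ===== VERDICT (by name: the statement is the Claim_ definition above) =====
theorem unquote_py_spec : Claim_equal_unquote_py := by
  intro value _
  unfold Spec_unquote_py unquote_py unquote_py_alt
  rw [unquoteASkip_eq_dropWhile]
  cases h : value.toList.dropWhile (fun ch => ch = ' ' ∨ ch = '\t') with
  | nil => rfl
  | cons q tail =>
    simp only
    by_cases hq : q = '"' ∨ q = '\''
    · have hq' : q ≠ '\\' := by rcases hq with h | h <;> subst h <;> decide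
      rw [if_pos hq, if_pos hq, aLoop_init q hq' tail]
      cases unquoteBFind q q tail <;> rfl
    · rw [if_neg hq, if_neg hq]
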